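-- pv_equiv track=rewrite | github.com/daniel-reich/ubiquitous-fiesta | DqLngKnnJcZyPMctn_16.py | stock_picker
-- ===== SOURCE A (Python) =====
-- def stock_picker(lst):
--     diffs = [lst[i] - lst[i - 1] for i in range(1, len(lst))]
--     max_diff = acc_diffs = 0
--     increasing = False
--     for d in diffs:
--         if d >= 0:
--             if increasing:
--                 acc_diffs += d
--             else:
--                 acc_diffs = d
--                 increasing = True
--         else:
--             increasing = False
--         if acc_diffs > max_diff:
--             max_diff = acc_diffs
--     return max_diff if max_diff else -1
-- ===== SOURCE B (Python) =====
-- def stock_picker(lst):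
--     if len(lst) < 2:
--         return -1
--     max_diff = 0
--     start = lst[0]
--     for i in range(1, len(lst)):
--         if lst[i] >= lst[i - 1]:
--             max_diff = max(max_diff, lst[i] - start)
--         else:
--             start = lst[i]
--     return max_diff if max_diff else -1
-- ===== Notes on version B (the rewrite author's own statement) =====
-- stated objective: simpler
-- what changed: B drops A's precomputed diffs list and the run-sum accumulator/boolean, instead tracking the current non-decreasing run's start price and taking max(price - start) in a single direct pass.
import Mathlib
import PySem

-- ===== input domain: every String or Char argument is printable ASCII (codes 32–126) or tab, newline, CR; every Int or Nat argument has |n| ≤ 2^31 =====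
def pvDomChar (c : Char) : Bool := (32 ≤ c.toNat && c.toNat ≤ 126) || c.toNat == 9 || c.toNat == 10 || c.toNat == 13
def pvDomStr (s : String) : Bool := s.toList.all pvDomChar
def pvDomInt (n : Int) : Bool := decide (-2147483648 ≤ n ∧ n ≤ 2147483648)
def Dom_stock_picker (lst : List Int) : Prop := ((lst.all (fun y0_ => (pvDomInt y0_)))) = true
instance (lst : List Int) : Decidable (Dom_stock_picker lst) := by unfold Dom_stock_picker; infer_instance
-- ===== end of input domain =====

-- B replaces A's diffs list + run-sum accumulator/boolean by tracking the current run's start price (simpler decomposition; same O(n) cost).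

-- ===== PORT A =====
-- diffs = [lst[i] - lst[i-1] for i in range(1, len(lst))]: consecutive differences
def pvDiffsA : List Int → List Int
  | a :: b :: rest => (b - a) :: pvDiffsA (b :: rest)
  | _ => []

-- loop body over d: state (max_diff, acc_diffs, increasing)
def pvStepA (st : Int × Int × Bool) (d : Int) : Int × Int × Bool :=
  let (m, acc, inc) := st
  let (acc', inc') :=
    if d ≥ 0 then
      (if inc then (acc + d, true) else (d, true))
    else (acc, false)
  (if acc' > m then acc' else m, acc', inc')

def stock_picker (lst : List Int) : Int :=
  let diffs := pvDiffsA lst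
  let st := diffs.foldl pvStepA (0, 0, false)
  if st.1 ≠ 0 then st.1 else -1

-- ===== PORT B =====
-- loop: prev = lst[i-1], start = current run's start, m = max_diff
def pvGoB (prev start m : Int) : List Int → Int
  | [] => m
  | c :: rest =>
      if c ≥ prev then pvGoB c start (max m (c - start)) rest
      else pvGoB c c m rest

def stock_picker_alt (lst : List Int) : Int :=
  match lst with
  | [] => -1
  | [_] => -1
  | x :: rest =>
      let m := pvGoB x x 0 rest
      if m ≠ 0 then m else -1

-- ===== PRECONDITION & SPEC =====
def Spec_stock_picker (lst : List Int) (out : Int) : Prop := out = stock_picker_alt lst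
instance (lst : List Int) (out : Int) : Decidable (Spec_stock_picker lst out) := by unfold Spec_stock_picker; infer_instance

-- ===== CLAIM (what is proved, stated in full; the proofs are below) =====
def Claim_equal_stock_picker : Prop := ∀ (lst : List Int), Dom_stock_picker lst → Spec_stock_picker lst (stock_picker lst)

-- ===== LEMMAS AND PROOFS =====

-- Loop invariant: A's fold over the remaining diffs equals B's run-start recursion,
-- provided acc = prev - start when increasing (else start = prev) and acc ≤ max_diff.
theorem pvLoop_eq (rest : List Int) : ∀ (p s m acc : Int) (inc : Bool),
    (if inc then acc = p - s else s = p) → acc ≤ m →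
    ((pvDiffsA (p :: rest)).foldl pvStepA (m, acc, inc)).1 = pvGoB p s m rest := by
  induction rest with
  | nil => intro p s m acc inc _ _; simp [pvDiffsA, pvGoB]
  | cons c rest ih =>
    intro p s m acc inc hinv hle
    have hstep : pvDiffsA (p :: c :: rest) = (c - p) :: pvDiffsA (c :: rest) := rfl
    rw [hstep, List.foldl_cons]
    by_cases hd : c - p ≥ 0
    · have hcp : c ≥ p := by omega
      have hge : (c : Int) - s = c - s := rfl
      cases inc with
      | false =>
        have hs : s = p := by simpa using hinv
        have hA : pvStepA (m, acc, false) (c - p) =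
            (max m (c - s), c - s, true) := by
          simp only [pvStepA, if_pos hd]
          subst hs
          have : (if c - s > m then c - s else m) = max m (c - s) := by omega
          simp [this]
        rw [hA, ih c s (max m (c - s)) (c - s) true (by simp) (by omega)]
        simp [pvGoB, hcp]
      | true =>
        have hacc : acc = p - s := by simpa using hinv
        have hA : pvStepA (m, acc, true) (c - p) =
            (max m (c - s), c - s, true) := by
          simp only [pvStepA, if_pos hd]
          have h1 : acc + (c - p) = c - s := by omega
          have h2 : (if c - s > m then c - s else m) = max m (c - s) := by omega
          simp [h1, h2]
        rw [hA, ih c s (max m (c - s)) (c - s) true (by simp) (by omega)]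
        simp [pvGoB, hcp]
    · have hcp : ¬ c ≥ p := by omega
      have hA : pvStepA (m, acc, inc) (c - p) = (m, acc, false) := by
        simp only [pvStepA, if_neg hd]
        have : (if acc > m then acc else m) = m := by omega
        simp [this]
      rw [hA, ih c c m acc false (by simp) hle]
      simp [pvGoB, hcp]

-- ===== VERDICT (by name: the statement is the Claim_ definition above) =====
theorem stock_picker_spec : Claim_equal_stock_picker := by
  intro lst _
  unfold Spec_stock_picker
  match lst with
  | [] => rfl
  | [x] => rfl
  | x :: c :: rest =>
    show stock_picker (x :: c :: rest) = stock_picker_alt (x :: c :: rest)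
    simp only [stock_picker, stock_picker_alt]
    rw [pvLoop_eq (c :: rest) x x 0 0 false (by simp) le_rfl]
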